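-- pv_equiv track=rewrite | github.com/EmmittMendez/CursoPython | CursoUdemy/Dia5/PromedioLista.py | reducir_lista
-- ===== SOURCE A (Python) =====
-- def reducir_lista(lista):
--     lista_numeros = []
--     mayor = max(lista)
--     for elemento in lista:
--         if elemento not in lista_numeros and elemento < mayor:
--             lista_numeros.append(elemento)
--         else:
--             pass
--     return lista_numeros
-- ===== SOURCE B (Python) =====
-- def reducir_lista(lista):
--     mayor = max(lista)
--     resultado = []
--     resto = lista
--     while resto:
--         h = resto[0]
--         if h < mayor:
--             resultado.append(h)
--         # erase every later copy of h from the remaining input: no 'seen' membership test needed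
--         resto = [x for x in resto[1:] if x != h]
--     return resultado
-- ===== Notes on version B (the rewrite author's own statement) =====
-- stated objective: alternative
-- what changed: A deduplicates by scanning an accumulated output list for membership inside one interleaved loop; B never keeps or tests a seen-collection: each step it takes the head of the remaining input, emits it if below the max, and erases all later copies of it from the remaining input, shrinking the work list until empty.
import Mathlib
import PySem

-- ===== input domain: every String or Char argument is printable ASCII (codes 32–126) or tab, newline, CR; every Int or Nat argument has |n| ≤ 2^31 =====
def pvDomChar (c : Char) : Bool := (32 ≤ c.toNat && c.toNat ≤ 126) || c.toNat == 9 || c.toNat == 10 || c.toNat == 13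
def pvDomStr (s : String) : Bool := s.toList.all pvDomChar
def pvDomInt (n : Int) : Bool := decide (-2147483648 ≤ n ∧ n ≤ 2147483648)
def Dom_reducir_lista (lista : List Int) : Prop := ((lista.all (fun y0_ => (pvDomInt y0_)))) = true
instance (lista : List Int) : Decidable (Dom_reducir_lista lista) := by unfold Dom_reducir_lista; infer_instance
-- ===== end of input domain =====

-- B deduplicates by erasing later copies of each emitted head from the remaining input
-- (no seen-collection / membership test), an alternative algorithm of similar cost.


-- ===== PORT A =====
-- max(lista) raises ValueError on []; ported via PySem.List.max? (none there, excluded by Pre_).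
def reducir_lista (lista : List Int) : List Int :=
  match PySem.List.max? lista (fun y => y) with
  | none => []
  | some mayor =>
      lista.foldl (fun lista_numeros elemento =>
        if ¬ lista_numeros.contains elemento ∧ elemento < mayor then
          lista_numeros ++ [elemento]
        else lista_numeros) []

-- ===== PORT B =====
-- the while loop: state (resultado, resto); each step consumes the head of resto and
-- filters its later copies out of resto, so resto strictly shrinks.
def reducirGoB (mayor : Int) (resultado : List Int) (resto : List Int) : List Int :=
  match resto with
  | [] => resultado
  | h :: t =>
      reducirGoB mayor (if h < mayor then resultado ++ [h] else resultado)
        (t.filter (fun x => x != h))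
termination_by resto.length
decreasing_by
  simpa using Nat.lt_succ_of_le (List.length_filter_le _ _)

def reducir_lista_alt (lista : List Int) : List Int :=
  match PySem.List.max? lista (fun y => y) with
  | none => []
  | some mayor => reducirGoB mayor [] lista

-- ===== PRECONDITION & SPEC =====
-- Pre_ excludes only the empty list, on which A's max(lista) raises ValueError (B raises too).
def Pre_reducir_lista (lista : List Int) : Prop := lista ≠ []
instance (lista : List Int) : Decidable (Pre_reducir_lista lista) := by unfold Pre_reducir_lista; infer_instance
def pvWitness_reducir_lista : List Int := [3, 1, 3, 2]

def Spec_reducir_lista (lista : List Int) (out : List Int) : Prop := out = reducir_lista_alt lista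
instance (lista : List Int) (out : List Int) : Decidable (Spec_reducir_lista lista out) := by unfold Spec_reducir_lista; infer_instance

-- ===== CLAIM (what is proved, stated in full; the proofs are below) =====
def Claim_equal_reducir_lista : Prop := ∀ (lista : List Int), Dom_reducir_lista lista → Pre_reducir_lista lista → Spec_reducir_lista lista (reducir_lista lista)

-- ===== LEMMAS AND PROOFS =====

-- equation lemmas for the well-founded loop (rfl does not reduce it)
theorem goB_nil (m : Int) (out : List Int) : reducirGoB m out [] = out := by
  rw [reducirGoB]

theorem goB_cons (m h : Int) (out t : List Int) :
    reducirGoB m out (h :: t) =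
      reducirGoB m (if h < m then out ++ [h] else out) (t.filter (fun x => x != h)) := by
  rw [reducirGoB]

-- removing all copies of an element that is not below the max does not change B's loop
theorem goB_skip (m h : Int) (hm : ¬ h < m) :
    ∀ (n : ℕ) (l out : List Int), l.length ≤ n →
      reducirGoB m out (l.filter (fun x => x != h)) = reducirGoB m out l := by
  intro n
  induction n with
  | zero =>
      intro l out hl
      rw [List.length_eq_zero_iff.mp (Nat.le_zero.mp hl), List.filter_nil]
  | succ n ih =>
      intro l out hl
      match l with
      | [] => rw [List.filter_nil]
      | a :: t =>
          rw [List.filter_cons]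
          by_cases ha : a = h
          · subst ha
            rw [if_neg (by simp), goB_cons, if_neg hm]
          · rw [if_pos (by simp [ha]), goB_cons, goB_cons]
            rw [← ih (t.filter (fun x => x != a)) _
              (le_trans (List.length_filter_le _ _) (Nat.le_of_succ_le_succ hl))]
            simp only [List.filter_filter]
            congr 1
            apply List.filter_congr
            intro x _
            exact Bool.and_comm _ _

-- A's interleaved fold, started at acc, equals B's loop run on the input with
-- acc's elements already erased
theorem fold_eq_goB (m : Int) :
    ∀ (n : ℕ) (xs acc : List Int), xs.length ≤ n →
      xs.foldl (fun ns e => if ¬ ns.contains e ∧ e < m then ns ++ [e] else ns) acc =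
        reducirGoB m acc (xs.filter (fun x => !acc.contains x)) := by
  intro n
  induction n with
  | zero =>
      intro xs acc hl
      rw [List.length_eq_zero_iff.mp (Nat.le_zero.mp hl)]
      exact (goB_nil m acc).symm
  | succ n ih =>
      intro xs acc hl
      match xs with
      | [] => exact (goB_nil m acc).symm
      | h :: t =>
          have ht : t.length ≤ n := Nat.le_of_succ_le_succ hl
          rw [List.foldl_cons, List.filter_cons]
          by_cases hc : acc.contains h = true
          · have h1 : ¬ ((!acc.contains h) = true) := by simp only [Bool.not_eq_true', Bool.not_eq_false]; exact hc
            have h2 : ¬ (¬ acc.contains h = true ∧ h < m) := fun p => p.1 hc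
            rw [if_neg h1, if_neg h2]
            exact ih t acc ht
          · have h1 : (!acc.contains h) = true := by rw [eq_false_of_ne_true hc, Bool.not_false]
            rw [if_pos h1, goB_cons]
            by_cases hlt : h < m
            · have h2 : (¬ acc.contains h = true ∧ h < m) := ⟨hc, hlt⟩
              rw [if_pos h2, if_pos hlt, ih t (acc ++ [h]) ht]
              simp only [List.filter_filter]
              congr 1
              apply List.filter_congr
              intro x _
              by_cases h3 : x ∈ acc <;> by_cases h4 : x = h <;> simp [h3, h4]
            · have h2 : ¬ (¬ acc.contains h = true ∧ h < m) := fun p => hlt p.2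
              rw [if_neg h2, if_neg hlt, ih t acc ht,
                ← goB_skip m h hlt (t.filter (fun x => !acc.contains x)).length
                  (t.filter (fun x => !acc.contains x)) acc le_rfl]

-- ===== VERDICT (by name: the statement is the Claim_ definition above) =====
theorem reducir_lista_spec : Claim_equal_reducir_lista := by
  intro lista _ _
  unfold Spec_reducir_lista reducir_lista reducir_lista_alt
  cases hmax : PySem.List.max? lista (fun y => y) with
  | none => rfl
  | some mayor =>
      dsimp only
      rw [fold_eq_goB mayor lista.length lista [] le_rfl]
      simp
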